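-- pv_equiv track=rewrite | github.com/fork52/py-snippets | src/py_snippets/combinations/partition_generator.py | partition_generator
-- ===== SOURCE A (Python) =====
-- def partition_generator(arr):
--     """
--     Generates and returns all partitions of an array.
--     Time Complexity:  O( 2 ^ (n - 1) * n)
--     Space Complexity: O( 2 ^ (n - 1) * n)
--     """
--     partitions = []
--     n = len(arr)
--
--     lim = 1 << (n - 1)
--     for mask in range(lim):
--         current_partition = []
--         current_subset = []
--         for ind in range(n):
--             current_subset.append(arr[ind])
--             if mask & (1 << ind) or ind == n - 1:
--                 current_partition.append(current_subset)
--                 current_subset = []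
--         partitions.append(current_partition)
--
--     return partitions
-- ===== SOURCE B (Python) =====
-- def partition_generator(arr):
--     """
--     Generates and returns all partitions of an array by growing prefixes:
--     each new element either joins the last block of a partition (first half)
--     or starts a new block (second half), reproducing A's mask ordering.
--     """
--     parts = [[[arr[0]]]]
--     for x in arr[1:]:
--         parts = [p[:-1] + [p[-1] + [x]] for p in parts] + \
--                 [p + [[x]] for p in parts]
--     return parts
-- ===== Notes on version B (the rewrite author's own statement) =====
-- stated objective: alternative
-- what changed: Replaces the bitmask enumeration (for each mask, rescan the whole array testing bits) by a structural recursion on prefixes: each new element either joins the last block or opens a new block, doubling the partition list in place.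
import Mathlib
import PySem

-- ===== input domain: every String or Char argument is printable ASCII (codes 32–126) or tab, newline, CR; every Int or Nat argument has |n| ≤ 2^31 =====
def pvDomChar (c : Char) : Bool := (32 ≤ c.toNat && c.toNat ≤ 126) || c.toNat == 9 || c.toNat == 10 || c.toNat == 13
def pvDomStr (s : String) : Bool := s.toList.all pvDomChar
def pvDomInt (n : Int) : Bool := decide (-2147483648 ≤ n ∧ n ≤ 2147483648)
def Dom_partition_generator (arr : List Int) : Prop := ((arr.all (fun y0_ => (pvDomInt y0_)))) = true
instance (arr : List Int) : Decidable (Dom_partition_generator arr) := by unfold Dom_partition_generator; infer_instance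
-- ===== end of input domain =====

-- B replaces A's bitmask enumeration by a structural recursion on prefixes (each new
-- element either joins the last block or opens a new block); same cost, different algorithm.

-- ===== PORT A =====
-- inner loop body: for ind in range(n): append arr[ind] to current_subset; maybe close the block
def pvStepA (arr : List Int) (n mask : Nat) (st : List (List Int) × List Int) (ind : Nat) :
    List (List Int) × List Int :=
  let cs := st.2 ++ [arr.getD ind 0]   -- arr[ind]; ind ∈ range n is always in range, so getD is exact
  if mask &&& (1 <<< ind) ≠ 0 ∨ ind = n - 1 then (st.1 ++ [cs], []) else (st.1, cs)

def pvInnerA (arr : List Int) (n mask : Nat) : List (List Int) :=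
  ((List.range n).foldl (pvStepA arr n mask) ([], [])).1

def partition_generator (arr : List Int) : List (List (List Int)) :=
  let n := arr.length
  let lim := 1 <<< (n - 1)   -- Python raises ValueError when n = 0 (1 << -1); excluded by Pre_
  (List.range lim).foldl (fun ps mask => ps ++ [pvInnerA arr n mask]) []

-- ===== PORT B =====
-- one pass of Source B's loop body: parts = [p[:-1] + [p[-1] + [x]] for p in parts] + [p + [[x]] for p in parts]
-- (every p is nonempty, so dropLast / getLastD are exact ports of p[:-1] / p[-1])
def pvStepB (ps : List (List (List Int))) (y : Int) : List (List (List Int)) :=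
  ps.map (fun p => p.dropLast ++ [p.getLastD [] ++ [y]]) ++ ps.map (fun p => p ++ [[y]])

def partition_generator_alt (arr : List Int) : List (List (List Int)) :=
  match arr with
  | [] => []                 -- Python B raises IndexError on []; excluded by Pre_
  | x :: rest => rest.foldl pvStepB [[[x]]]

-- ===== PRECONDITION & SPEC =====
-- Pre_ excludes only the empty list, on which A raises ValueError (1 << -1) and B raises IndexError.
def Pre_partition_generator (arr : List Int) : Prop := arr ≠ []
instance (arr : List Int) : Decidable (Pre_partition_generator arr) := by
  unfold Pre_partition_generator; infer_instance

def pvWitness_partition_generator : List Int := [1, 2, 3]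

def Spec_partition_generator (arr : List Int) (out : List (List (List Int))) : Prop := out = partition_generator_alt arr
instance (arr : List Int) (out : List (List (List Int))) : Decidable (Spec_partition_generator arr out) := by unfold Spec_partition_generator; infer_instance

-- ===== CLAIM (what is proved, stated in full; the proofs are below) =====
def Claim_equal_partition_generator : Prop := ∀ (arr : List Int), Dom_partition_generator arr → Pre_partition_generator arr → Spec_partition_generator arr (partition_generator arr)

-- ===== LEMMAS AND PROOFS =====

-- the bit test A's branch performs, phrased via testBit
theorem pv_and_ne_zero (mask ind : Nat) :
    (mask &&& (1 <<< ind) ≠ 0) ↔ mask.testBit ind = true := by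
  rw [Nat.one_shiftLeft, Nat.and_two_pow]
  cases h : mask.testBit ind <;> simp [Nat.pow_eq_zero]

-- outer loop is a map
theorem pv_foldl_append_map {α β : Type} (f : α → β) (l : List α) (acc : List β) :
    l.foldl (fun ps a => ps ++ [f a]) acc = acc ++ l.map f := by
  induction l generalizing acc with
  | nil => simp
  | cons a l ih => simp [List.foldl_cons, ih]

-- A in map form
theorem pv_A_eq_map (arr : List Int) :
    partition_generator arr
      = (List.range (1 <<< (arr.length - 1))).map (pvInnerA arr arr.length) := by
  unfold partition_generator
  simpa using pv_foldl_append_map (pvInnerA arr arr.length) _ []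

-- on indices below n-1 the extended array's step agrees with the short array's step,
-- for any mask whose low n-1 bits agree with m's
theorem pv_step_agree (xs : List Int) (y : Int) (m mask : Nat)
    (hbits : ∀ i, i < xs.length - 1 → mask.testBit i = m.testBit i)
    (hn : 1 ≤ xs.length) :
    ∀ ind ∈ List.range (xs.length - 1), ∀ st,
      pvStepA (xs ++ [y]) (xs.length + 1) mask st ind = pvStepA xs xs.length m st ind := by
  intro ind hind st
  rw [List.mem_range] at hind
  unfold pvStepA
  have hget : (xs ++ [y]).getD ind 0 = xs.getD ind 0 :=
    List.getD_append _ _ _ _ (by omega)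
  have hcond : (mask &&& (1 <<< ind) ≠ 0 ∨ ind = xs.length + 1 - 1)
      ↔ (m &&& (1 <<< ind) ≠ 0 ∨ ind = xs.length - 1) := by
    rw [pv_and_ne_zero, pv_and_ne_zero, hbits ind hind]
    have h1 : ind ≠ xs.length + 1 - 1 := by omega
    have h2 : ind ≠ xs.length - 1 := by omega
    tauto
  rw [hget]
  by_cases h : m &&& (1 <<< ind) ≠ 0 ∨ ind = xs.length - 1
  · rw [if_pos h, if_pos (hcond.mpr h)]
  · rw [if_neg h, if_neg (fun hc => h (hcond.mp hc))]

-- the short array's inner loop, with its state before the last (always-closing) step exposed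
theorem pv_innerA_last (xs : List Int) (m : Nat) (hn : 1 ≤ xs.length) :
    pvInnerA xs xs.length m =
      ((List.range (xs.length - 1)).foldl (pvStepA xs xs.length m) ([], [])).1
        ++ [((List.range (xs.length - 1)).foldl (pvStepA xs xs.length m) ([], [])).2
              ++ [xs.getD (xs.length - 1) 0]] := by
  unfold pvInnerA
  obtain ⟨k, hk⟩ : ∃ k, xs.length = k + 1 := ⟨xs.length - 1, by omega⟩
  have hr : List.range xs.length = List.range (xs.length - 1) ++ [xs.length - 1] := by
    rw [hk]; simp [List.range_succ]
  rw [hr, List.foldl_append]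
  simp only [List.foldl_cons, List.foldl_nil]
  rw [pvStepA, if_pos (Or.inr rfl)]

-- mask m < 2^(n-1): the new element joins the last block
theorem pv_innerA_join (xs : List Int) (y : Int) (m : Nat)
    (hn : 1 ≤ xs.length) (hm : m < 2 ^ (xs.length - 1)) :
    pvInnerA (xs ++ [y]) (xs.length + 1) m
      = (pvInnerA xs xs.length m).dropLast
        ++ [(pvInnerA xs xs.length m).getLastD [] ++ [y]] := by
  obtain ⟨k, hk⟩ : ∃ k, xs.length = k + 1 := ⟨xs.length - 1, by omega⟩
  have hr : List.range (xs.length + 1) = List.range (xs.length - 1) ++ [xs.length - 1, xs.length] := by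
    rw [hk]; simp [List.range_succ]
  rw [pv_innerA_last xs m hn]
  conv_lhs => unfold pvInnerA
  rw [hr, List.foldl_append,
    PySem.List.foldl_congr_mem' _ _ _ _ (pv_step_agree xs y m m (fun _ _ => rfl) hn)]
  set s := (List.range (xs.length - 1)).foldl (pvStepA xs xs.length m) ([], []) with hs
  have hb : ¬ (m &&& (1 <<< (xs.length - 1)) ≠ 0 ∨ xs.length - 1 = xs.length + 1 - 1) := by
    rw [pv_and_ne_zero]
    push Not
    exact ⟨by simp [Nat.testBit_lt_two_pow hm], by omega⟩
  have hg1 : (xs ++ [y]).getD (xs.length - 1) 0 = xs.getD (xs.length - 1) 0 :=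
    List.getD_append _ _ _ _ (by omega)
  have hg2 : (xs ++ [y]).getD xs.length 0 = y := by
    simp [List.getD_eq_getElem?_getD]
  simp only [List.foldl_cons, List.foldl_nil]
  rw [pvStepA, if_pos (Or.inr (by omega : xs.length = xs.length + 1 - 1))]
  rw [pvStepA, if_neg hb]
  rw [hg1, hg2]
  simp

-- mask 2^(n-1) + m: the new element opens a new block
theorem pv_innerA_new (xs : List Int) (y : Int) (m : Nat)
    (hn : 1 ≤ xs.length) (hm : m < 2 ^ (xs.length - 1)) :
    pvInnerA (xs ++ [y]) (xs.length + 1) (2 ^ (xs.length - 1) + m)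
      = pvInnerA xs xs.length m ++ [[y]] := by
  obtain ⟨k, hk⟩ : ∃ k, xs.length = k + 1 := ⟨xs.length - 1, by omega⟩
  have hr : List.range (xs.length + 1) = List.range (xs.length - 1) ++ [xs.length - 1, xs.length] := by
    rw [hk]; simp [List.range_succ]
  rw [pv_innerA_last xs m hn]
  conv_lhs => unfold pvInnerA
  rw [hr, List.foldl_append,
    PySem.List.foldl_congr_mem' _ _ _ _
      (pv_step_agree xs y m (2 ^ (xs.length - 1) + m)
        (fun i hi => Nat.testBit_two_pow_add_gt hi m) hn)]
  set s := (List.range (xs.length - 1)).foldl (pvStepA xs xs.length m) ([], []) with hs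
  have hb : (2 ^ (xs.length - 1) + m) &&& (1 <<< (xs.length - 1)) ≠ 0 ∨
      xs.length - 1 = xs.length + 1 - 1 := by
    left
    rw [pv_and_ne_zero, Nat.testBit_two_pow_add_eq, Nat.testBit_lt_two_pow hm]
    rfl
  have hg1 : (xs ++ [y]).getD (xs.length - 1) 0 = xs.getD (xs.length - 1) 0 :=
    List.getD_append _ _ _ _ (by omega)
  have hg2 : (xs ++ [y]).getD xs.length 0 = y := by
    simp [List.getD_eq_getElem?_getD]
  simp only [List.foldl_cons, List.foldl_nil]
  rw [pvStepA, if_pos (Or.inr (by omega : xs.length = xs.length + 1 - 1))]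
  rw [pvStepA, if_pos hb]
  rw [hg1, hg2]
  simp

-- A's snoc recurrence: appending y doubles the list exactly as pvStepB does
theorem pv_A_snoc (xs : List Int) (y : Int) (hn : xs ≠ []) :
    partition_generator (xs ++ [y]) = pvStepB (partition_generator xs) y := by
  have hlen : 1 ≤ xs.length := by
    cases xs with
    | nil => exact absurd rfl hn
    | cons a l => simp
  rw [pv_A_eq_map, pv_A_eq_map]
  unfold pvStepB
  simp only [List.length_append, List.length_cons, List.length_nil, Nat.one_shiftLeft,
    List.map_map]
  have h1 : xs.length + (0 + 1) - 1 = (xs.length - 1) + 1 := by omega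
  rw [h1, pow_succ, mul_two, List.range_add, List.map_append, List.map_map]
  congr 1
  · apply List.map_congr_left
    intro m hm
    rw [List.mem_range] at hm
    simp only [Function.comp_apply]
    have := pv_innerA_join xs y m hlen hm
    have hL : xs.length + (0 + 1) = xs.length + 1 := by omega
    rw [hL]
    exact this
  · apply List.map_congr_left
    intro m hm
    rw [List.mem_range] at hm
    simp only [Function.comp_apply]
    have := pv_innerA_new xs y m hlen hm
    have hL : xs.length + (0 + 1) = xs.length + 1 := by omega
    rw [hL]
    exact this

-- B's snoc recurrence
theorem pv_B_snoc (x : Int) (rest : List Int) (y : Int) :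
    partition_generator_alt (x :: rest ++ [y]) = pvStepB (partition_generator_alt (x :: rest)) y := by
  simp [partition_generator_alt, List.foldl_append]

-- base case
theorem pv_base (x : Int) : partition_generator [x] = [[[x]]] := by
  simp [partition_generator, pvInnerA, pvStepA, List.range_succ]

theorem pv_main (arr : List Int) (h : arr ≠ []) :
    partition_generator arr = partition_generator_alt arr := by
  induction arr using List.reverseRecOn with
  | nil => exact absurd rfl h
  | append_singleton xs y ih =>
    by_cases hxs : xs = []
    · subst hxs
      simpa [partition_generator_alt] using pv_base y
    · rw [pv_A_snoc xs y hxs, ih hxs]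
      obtain ⟨a, l, rfl⟩ := List.exists_cons_of_ne_nil hxs
      rw [← pv_B_snoc]

-- ===== VERDICT (by name: the statement is the Claim_ definition above) =====
theorem partition_generator_spec : Claim_equal_partition_generator := by
  intro arr _ hpre
  exact pv_main arr hpre
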